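-- pv_equiv track=rewrite | github.com/AlexWilkinsonnn/larnd_infill | ME/dataset.py | _get_gap_reflect_coords
-- ===== SOURCE A (Python) =====
-- def _get_gap_reflect_coords(gaps):
--     gaps_set = set(gaps)
--
--     gap_pos_rflct_coord, gap_neg_rflct_coord = {}, {}
--     for gap_loc in gaps:
--         gap_start = gap_loc
--         while gap_start in gaps_set:
--             gap_start -= 1
--         gap_pos_rflct_coord[gap_loc] = gap_start
--
--         gap_end = gap_loc
--         while gap_end in gaps_set:
--             gap_end += 1
--         gap_neg_rflct_coord[gap_loc] = gap_end
--
--     return gaps_set, gap_pos_rflct_coord, gap_neg_rflct_coord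
-- ===== SOURCE B (Python) =====
-- def _get_gap_reflect_coords(gaps):
--     gaps_set = set(gaps)
--     down, up = {}, {}
--     for v in sorted(gaps_set):
--         down[v] = down.get(v - 1, v - 1)
--     for v in sorted(gaps_set, reverse=True):
--         up[v] = up.get(v + 1, v + 1)
--     gap_pos_rflct_coord = {g: down[g] for g in gaps}
--     gap_neg_rflct_coord = {g: up[g] for g in gaps}
--     return gaps_set, gap_pos_rflct_coord, gap_neg_rflct_coord
-- ===== Notes on version B (the rewrite author's own statement) =====
-- stated objective: alternative
-- what changed: Replaces A's per-element while-loop walks through each gap run (O(n*L) with L the run length) by a single DP sweep over the sorted distinct values: down[v] = down.get(v-1, v-1) ascending and up[v] = up.get(v+1, v+1) descending, then one pass over gaps to build the result dicts; intended as asymptotically better (O(n log n) vs O(n*L)) but a timing run could not confirm a consistent speed-up.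
import Mathlib
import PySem

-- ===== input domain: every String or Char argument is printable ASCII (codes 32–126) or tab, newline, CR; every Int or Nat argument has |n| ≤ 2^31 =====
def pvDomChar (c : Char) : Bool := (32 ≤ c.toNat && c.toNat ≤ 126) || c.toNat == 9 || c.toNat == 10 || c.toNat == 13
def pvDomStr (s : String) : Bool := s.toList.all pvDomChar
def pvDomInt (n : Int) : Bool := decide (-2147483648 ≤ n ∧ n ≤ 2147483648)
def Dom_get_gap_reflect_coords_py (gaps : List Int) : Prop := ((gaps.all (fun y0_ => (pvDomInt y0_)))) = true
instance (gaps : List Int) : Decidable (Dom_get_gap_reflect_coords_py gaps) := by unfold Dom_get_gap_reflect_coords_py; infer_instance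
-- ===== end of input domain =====

-- B replaces A's per-element while-loop walks by one sorted sweep over the distinct values
-- with a DP dictionary (alternative algorithm, same return value).

-- ===== PORT A =====
-- termination measure for the 'while gap_start in gaps_set: gap_start -= 1' loop
lemma pv_desc_dec (S : List Int) (x : Int) (hx : x ∈ S) :
    (S.filter (fun y => decide (y ≤ x - 1))).length < (S.filter (fun y => decide (y ≤ x))).length := by
  have h1 : S.filter (fun y => decide (y ≤ x - 1)) =
      (S.filter (fun y => decide (y ≤ x))).filter (fun y => decide (y ≤ x - 1)) := by
    rw [List.filter_filter]
    apply List.filter_congr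
    intro a _
    by_cases h : a ≤ x - 1
    · simp [h, show a ≤ x by omega]
    · simp [h]
  rw [h1]
  exact List.length_filter_lt_length_iff_exists.mpr ⟨x, by simp [hx], by simp⟩

lemma pv_asc_dec (S : List Int) (x : Int) (hx : x ∈ S) :
    (S.filter (fun y => decide (x + 1 ≤ y))).length < (S.filter (fun y => decide (x ≤ y))).length := by
  have h1 : S.filter (fun y => decide (x + 1 ≤ y)) =
      (S.filter (fun y => decide (x ≤ y))).filter (fun y => decide (x + 1 ≤ y)) := by
    rw [List.filter_filter]
    apply List.filter_congr
    intro a _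
    by_cases h : x + 1 ≤ a
    · simp [h, show x ≤ a by omega]
    · simp [h]
  rw [h1]
  exact List.length_filter_lt_length_iff_exists.mpr ⟨x, by simp [hx], by simp⟩

-- 'gap_start = gap_loc; while gap_start in gaps_set: gap_start -= 1; return gap_start'
def pvDescend (S : List Int) (x : Int) : Int :=
  if h : x ∈ S then pvDescend S (x - 1) else x
termination_by (S.filter (fun y => decide (y ≤ x))).length
decreasing_by exact pv_desc_dec S x h

-- 'gap_end = gap_loc; while gap_end in gaps_set: gap_end += 1; return gap_end'
def pvAscend (S : List Int) (x : Int) : Int :=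
  if h : x ∈ S then pvAscend S (x + 1) else x
termination_by (S.filter (fun y => decide (x ≤ y))).length
decreasing_by exact pv_asc_dec S x h

def get_gap_reflect_coords_py (gaps : List Int) : List Int × (List (Int × Int)) × (List (Int × Int)) :=
  let gaps_set : PySem.Set Int := PySem.Set.ofList gaps
  let res := gaps.foldl
    (fun (st : PySem.Dict Int Int × PySem.Dict Int Int) gap_loc =>
      (st.1.insert gap_loc (pvDescend gaps_set gap_loc),
       st.2.insert gap_loc (pvAscend gaps_set gap_loc)))
    (PySem.Dict.empty, PySem.Dict.empty)
  (gaps_set, res.1.items, res.2.items)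

-- ===== PORT B =====
def get_gap_reflect_coords_py_alt (gaps : List Int) : List Int × (List (Int × Int)) × (List (Int × Int)) :=
  let gaps_set : PySem.Set Int := PySem.Set.ofList gaps
  let down := (PySem.List.sorted gaps_set (fun x => x) false).foldl
      (fun (d : PySem.Dict Int Int) v => d.insert v (d.getD (v - 1) (v - 1))) PySem.Dict.empty
  let up := (PySem.List.sorted gaps_set (fun x => x) true).foldl
      (fun (d : PySem.Dict Int Int) v => d.insert v (d.getD (v + 1) (v + 1))) PySem.Dict.empty
  -- 'down[g]' / 'up[g]': g is always a key of down/up (g ∈ gaps_set), so the default is never used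
  let pos := gaps.foldl (fun (d : PySem.Dict Int Int) g => d.insert g (down.getD g 0)) PySem.Dict.empty
  let neg := gaps.foldl (fun (d : PySem.Dict Int Int) g => d.insert g (up.getD g 0)) PySem.Dict.empty
  (gaps_set, pos.items, neg.items)

-- ===== PRECONDITION & SPEC =====
def Spec_get_gap_reflect_coords_py (gaps : List Int) (out : List Int × (List (Int × Int)) × (List (Int × Int))) : Prop := out = get_gap_reflect_coords_py_alt gaps
instance (gaps : List Int) (out : List Int × (List (Int × Int)) × (List (Int × Int))) : Decidable (Spec_get_gap_reflect_coords_py gaps out) := by unfold Spec_get_gap_reflect_coords_py; infer_instance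

-- ===== CLAIM (what is proved, stated in full; the proofs are below) =====
def Claim_equal_get_gap_reflect_coords_py : Prop := ∀ (gaps : List Int), Dom_get_gap_reflect_coords_py gaps → Spec_get_gap_reflect_coords_py gaps (get_gap_reflect_coords_py gaps)

-- ===== LEMMAS AND PROOFS =====
lemma pvDescend_not_mem (S : List Int) (x : Int) (hx : x ∉ S) : pvDescend S x = x := by
  rw [pvDescend]; simp [hx]

lemma pvDescend_mem (S : List Int) (x : Int) (hx : x ∈ S) :
    pvDescend S x = pvDescend S (x - 1) := by
  rw [pvDescend]; simp [hx]

lemma pvAscend_not_mem (S : List Int) (x : Int) (hx : x ∉ S) : pvAscend S x = x := by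
  rw [pvAscend]; simp [hx]

lemma pvAscend_mem (S : List Int) (x : Int) (hx : x ∈ S) :
    pvAscend S x = pvAscend S (x + 1) := by
  rw [pvAscend]; simp [hx]

-- the DP sweep over the sorted distinct values computes pvDescend on every processed value
lemma down_invariant (S : List Int) (l p : List Int) (d : PySem.Dict Int Int)
    (hmem : ∀ y, (y ∈ p ∨ y ∈ l) ↔ y ∈ S)
    (hsort : (p ++ l).Pairwise (· < ·))
    (hd : ∀ y, d.get? y = if y ∈ p then some (pvDescend S y) else none) :
    ∀ y, (l.foldl (fun (d : PySem.Dict Int Int) v => d.insert v (d.getD (v - 1) (v - 1))) d).get? y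
      = if y ∈ p ++ l then some (pvDescend S y) else none := by
  induction l generalizing p d with
  | nil => intro y; simpa using hd y
  | cons v t ih =>
    have hvS : v ∈ S := (hmem v).mp (Or.inr (List.mem_cons_self))
    have hval : d.getD (v - 1) (v - 1) = pvDescend S v := by
      rw [pvDescend_mem S v hvS]
      by_cases hp : v - 1 ∈ p
      · have : v - 1 ∈ S := (hmem _).mp (Or.inl hp)
        rw [PySem.Dict.getD_eq_get?_getD, hd (v - 1)]
        simp [hp]
      · have hnot : v - 1 ∉ S := by
          intro hS
          rcases (hmem (v - 1)).mpr hS with h | h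
          · exact hp h
          · rcases List.mem_cons.mp h with h | h
            · omega
            · have := (List.pairwise_append.mp hsort).2.1
              have hvlt := (List.pairwise_cons.mp this).1 _ h
              omega
        rw [PySem.Dict.getD_eq_get?_getD, hd (v - 1)]
        simp [hp, pvDescend_not_mem S _ hnot]
    have hsort' : ((p ++ [v]) ++ t).Pairwise (· < ·) := by
      simpa [List.append_assoc] using hsort
    have hmem' : ∀ y, (y ∈ p ++ [v] ∨ y ∈ t) ↔ y ∈ S := by
      intro y
      rw [← hmem y]
      simp only [List.mem_append, List.mem_cons]
      tauto
    have hd' : ∀ y, (d.insert v (d.getD (v - 1) (v - 1))).get? y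
        = if y ∈ p ++ [v] then some (pvDescend S y) else none := by
      intro y
      rw [PySem.Dict.get?_insert, hval]
      by_cases hyv : y = v
      · subst hyv; simp
      · simp [hyv, hd y]
    have := ih (p ++ [v]) _ hmem' hsort' hd'
    intro y
    rw [List.foldl_cons, this y]
    simp [List.mem_append, List.mem_cons]
  
lemma up_invariant (S : List Int) (l p : List Int) (d : PySem.Dict Int Int)
    (hmem : ∀ y, (y ∈ p ∨ y ∈ l) ↔ y ∈ S)
    (hsort : (p ++ l).Pairwise (· > ·))
    (hd : ∀ y, d.get? y = if y ∈ p then some (pvAscend S y) else none) :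
    ∀ y, (l.foldl (fun (d : PySem.Dict Int Int) v => d.insert v (d.getD (v + 1) (v + 1))) d).get? y
      = if y ∈ p ++ l then some (pvAscend S y) else none := by
  induction l generalizing p d with
  | nil => intro y; simpa using hd y
  | cons v t ih =>
    have hvS : v ∈ S := (hmem v).mp (Or.inr (List.mem_cons_self))
    have hval : d.getD (v + 1) (v + 1) = pvAscend S v := by
      rw [pvAscend_mem S v hvS]
      by_cases hp : v + 1 ∈ p
      · have : v + 1 ∈ S := (hmem _).mp (Or.inl hp)
        rw [PySem.Dict.getD_eq_get?_getD, hd (v + 1)]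
        simp [hp]
      · have hnot : v + 1 ∉ S := by
          intro hS
          rcases (hmem (v + 1)).mpr hS with h | h
          · exact hp h
          · rcases List.mem_cons.mp h with h | h
            · omega
            · have := (List.pairwise_append.mp hsort).2.1
              have hvlt := (List.pairwise_cons.mp this).1 _ h
              omega
        rw [PySem.Dict.getD_eq_get?_getD, hd (v + 1)]
        simp [hp, pvAscend_not_mem S _ hnot]
    have hsort' : ((p ++ [v]) ++ t).Pairwise (· > ·) := by
      simpa [List.append_assoc] using hsort
    have hmem' : ∀ y, (y ∈ p ++ [v] ∨ y ∈ t) ↔ y ∈ S := by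
      intro y
      rw [← hmem y]
      simp only [List.mem_append, List.mem_cons]
      tauto
    have hd' : ∀ y, (d.insert v (d.getD (v + 1) (v + 1))).get? y
        = if y ∈ p ++ [v] then some (pvAscend S y) else none := by
      intro y
      rw [PySem.Dict.get?_insert, hval]
      by_cases hyv : y = v
      · subst hyv; simp
      · simp [hyv, hd y]
    have := ih (p ++ [v]) _ hmem' hsort' hd'
    intro y
    rw [List.foldl_cons, this y]
    simp [List.mem_append, List.mem_cons]

-- A's single pass building two dicts equals two separate insert folds
lemma foldl_pair_insert (l : List Int) (f g : Int → Int) (d1 d2 : PySem.Dict Int Int) :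
    l.foldl (fun (st : PySem.Dict Int Int × PySem.Dict Int Int) x =>
        (st.1.insert x (f x), st.2.insert x (g x))) (d1, d2)
      = (l.foldl (fun d x => d.insert x (f x)) d1, l.foldl (fun d x => d.insert x (g x)) d2) := by
  induction l generalizing d1 d2 with
  | nil => rfl
  | cons x t ih => simp [List.foldl_cons, ih]

-- ===== VERDICT (by name: the statement is the Claim_ definition above) =====
theorem get_gap_reflect_coords_py_spec : Claim_equal_get_gap_reflect_coords_py := by
  intro gaps _
  unfold Spec_get_gap_reflect_coords_py
  have hnd : (PySem.Set.ofList gaps).Nodup := PySem.Set.nodup_ofList gaps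
  have hdown := down_invariant (PySem.Set.ofList gaps)
      (PySem.List.sorted (PySem.Set.ofList gaps) (fun x => x) false) [] PySem.Dict.empty
    (by intro y; simp [PySem.List.mem_sorted])
    (by simpa using PySem.List.sorted_ofList_pairwise_lt (xs := gaps))
    (by intro y; simp [PySem.Dict.get?_empty])
  have hup := up_invariant (PySem.Set.ofList gaps)
      (PySem.List.sorted (PySem.Set.ofList gaps) (fun x => x) true) [] PySem.Dict.empty
    (by intro y; simp [PySem.List.mem_sorted])
    (by
      have hpw := PySem.List.sorted_pairwise_rev (xs := PySem.Set.ofList gaps) (key := fun x : Int => x)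
      have hnd' : (PySem.List.sorted (PySem.Set.ofList gaps) (fun x : Int => x) true).Nodup :=
        (PySem.List.sorted_perm (PySem.Set.ofList gaps) (fun x : Int => x) true).nodup_iff.mpr hnd
      simpa using (hpw.and (List.Pairwise.imp (by intro a b h; exact h) hnd')).imp
        (fun h => lt_of_le_of_ne h.1 (Ne.symm h.2)))
    (by intro y; simp [PySem.Dict.get?_empty])
  have ha : get_gap_reflect_coords_py gaps = ((PySem.Set.ofList gaps : List Int),
      (gaps.foldl (fun (st : PySem.Dict Int Int × PySem.Dict Int Int) g =>
          (st.1.insert g (pvDescend (PySem.Set.ofList gaps) g),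
           st.2.insert g (pvAscend (PySem.Set.ofList gaps) g)))
        (PySem.Dict.empty, PySem.Dict.empty)).1.items,
      (gaps.foldl (fun (st : PySem.Dict Int Int × PySem.Dict Int Int) g =>
          (st.1.insert g (pvDescend (PySem.Set.ofList gaps) g),
           st.2.insert g (pvAscend (PySem.Set.ofList gaps) g)))
        (PySem.Dict.empty, PySem.Dict.empty)).2.items) := rfl
  have hb : get_gap_reflect_coords_py_alt gaps = ((PySem.Set.ofList gaps : List Int),
      (gaps.foldl (fun (d : PySem.Dict Int Int) g =>
          d.insert g (((PySem.List.sorted (PySem.Set.ofList gaps) (fun x => x) false).foldl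
            (fun (d : PySem.Dict Int Int) v => d.insert v (d.getD (v - 1) (v - 1)))
            PySem.Dict.empty).getD g 0)) PySem.Dict.empty).items,
      (gaps.foldl (fun (d : PySem.Dict Int Int) g =>
          d.insert g (((PySem.List.sorted (PySem.Set.ofList gaps) (fun x => x) true).foldl
            (fun (d : PySem.Dict Int Int) v => d.insert v (d.getD (v + 1) (v + 1)))
            PySem.Dict.empty).getD g 0)) PySem.Dict.empty).items) := rfl
  have h1 : gaps.foldl (fun (d : PySem.Dict Int Int) x =>
        d.insert x (pvDescend (PySem.Set.ofList gaps) x)) PySem.Dict.empty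
      = gaps.foldl (fun (d : PySem.Dict Int Int) g =>
        d.insert g (((PySem.List.sorted (PySem.Set.ofList gaps) (fun x => x) false).foldl
          (fun (d : PySem.Dict Int Int) v => d.insert v (d.getD (v - 1) (v - 1)))
          PySem.Dict.empty).getD g 0)) PySem.Dict.empty := by
    apply PySem.List.foldl_congr_mem
    intro d g hg
    have hgS : g ∈ PySem.Set.ofList gaps := (PySem.Set.mem_ofList gaps g).mpr hg
    have hv : ((PySem.List.sorted (PySem.Set.ofList gaps) (fun x => x) false).foldl
        (fun (d : PySem.Dict Int Int) v => d.insert v (d.getD (v - 1) (v - 1)))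
        PySem.Dict.empty).getD g 0 = pvDescend (PySem.Set.ofList gaps) g := by
      rw [PySem.Dict.getD_eq_get?_getD, hdown g]
      simp [PySem.List.mem_sorted, hgS]
    rw [hv]
  have h2 : gaps.foldl (fun (d : PySem.Dict Int Int) x =>
        d.insert x (pvAscend (PySem.Set.ofList gaps) x)) PySem.Dict.empty
      = gaps.foldl (fun (d : PySem.Dict Int Int) g =>
        d.insert g (((PySem.List.sorted (PySem.Set.ofList gaps) (fun x => x) true).foldl
          (fun (d : PySem.Dict Int Int) v => d.insert v (d.getD (v + 1) (v + 1)))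
          PySem.Dict.empty).getD g 0)) PySem.Dict.empty := by
    apply PySem.List.foldl_congr_mem
    intro d g hg
    have hgS : g ∈ PySem.Set.ofList gaps := (PySem.Set.mem_ofList gaps g).mpr hg
    have hv : ((PySem.List.sorted (PySem.Set.ofList gaps) (fun x => x) true).foldl
        (fun (d : PySem.Dict Int Int) v => d.insert v (d.getD (v + 1) (v + 1)))
        PySem.Dict.empty).getD g 0 = pvAscend (PySem.Set.ofList gaps) g := by
      rw [PySem.Dict.getD_eq_get?_getD, hup g]
      simp [PySem.List.mem_sorted, hgS]
    rw [hv]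
  rw [ha, hb, foldl_pair_insert]
  dsimp only
  rw [h1, h2]
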